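-- pv_equiv track=rewrite | github.com/obinopaul/malibu | malibu/agent/tool_server/integrations/video_generation/utils.py | find_min_sum_solution
-- ===== SOURCE A (Python) =====
-- def find_min_sum_solution(N: int):
--     """
--     You are given an integer N >= 5. Find four non-negative integers x, y, z, t such that:
--     5x + 6y + 7z + 8t = N and (x + y + z + t) is minimized
--
--     Special Case:
--     If N = 9, the solution is (x, y, z, t) = (0, 0, 0, 1)
--     """
--     if N < 5:
--         raise ValueError("N must be >= 5")
--     if N == 9:
--         return (0, 0, 0, 1)
--
--     best = None
--     min_count = float("inf")
--
--     # Loop for t (using 8s)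
--     for t in range(N // 8 + 1):
--         # Loop for z (using 7s)
--         for z in range((N - 8*t) // 7 + 1):
--             # Loop for y (using 6s)
--             for y in range((N - 8*t - 7*z) // 6 + 1):
--                 remaining = N - (8*t + 7*z + 6*y)
--                 if remaining < 0:
--                     continue
--                 if remaining % 5 != 0:
--                     continue
--                 x = remaining // 5
--                 count = x + y + z + t
--                 if count < min_count:
--                     min_count = count
--                     best = (x, y, z, t)
--
--     return best
-- ===== SOURCE B (Python) =====
-- def find_min_sum_solution(N: int):
--     """Closed-form: minimal count k = ceil(N/8); solve y+2z+3t = N-5k picking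
--     lex-smallest (t,z,y), which is what the scan order of the brute force yields."""
--     if N < 5:
--         raise ValueError("N must be >= 5")
--     if N == 9:
--         return (0, 0, 0, 1)
--     k = -(-N // 8)          # minimal x+y+z+t
--     r = N - 5 * k           # y + 2z + 3t must equal r, with y+z+t <= k
--     t = max(0, r - 2 * k)   # smallest feasible t
--     s = r - 3 * t
--     z = max(0, s - (k - t)) # smallest feasible z given t
--     y = s - 2 * z
--     x = k - y - z - t
--     return (x, y, z, t)
-- ===== Notes on version B (the rewrite author's own statement) =====
-- stated objective: faster
-- what changed: Replaced the triple nested scan over (t,z,y) by a closed-form O(1) computation: the minimal count is k = ceil(N/8), and the lex-smallest (t,z,y) solving y+2z+3t = N-5k under y+z+t <= k (which is exactly the tuple A's scan order picks first) is computed with max/arithmetic only.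
import Mathlib
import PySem

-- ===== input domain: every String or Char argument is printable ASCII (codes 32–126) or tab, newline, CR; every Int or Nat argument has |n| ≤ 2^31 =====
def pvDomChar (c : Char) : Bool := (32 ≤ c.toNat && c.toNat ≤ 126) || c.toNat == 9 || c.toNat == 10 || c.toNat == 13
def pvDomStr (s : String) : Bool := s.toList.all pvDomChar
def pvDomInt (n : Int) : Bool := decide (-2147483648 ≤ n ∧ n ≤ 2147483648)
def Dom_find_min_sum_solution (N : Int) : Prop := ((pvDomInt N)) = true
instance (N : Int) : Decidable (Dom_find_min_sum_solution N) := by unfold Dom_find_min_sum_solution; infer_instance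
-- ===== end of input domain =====

-- B replaces A's O(N^3) triple scan by a closed-form O(1) computation of the same tuple
-- (minimal count k = ceil(N/8), then the lex-smallest (t,z,y) solving y+2z+3t = N-5k).


-- ===== PORT A =====
-- literal transliteration of A; for N < 5 Python raises ValueError (excluded by Pre_), we return none there
def find_min_sum_solution (N : Int) : Option (List Int) :=
  if N < 5 then none
  else if N = 9 then some [0, 0, 0, 1]
  else
    ((PySem.List.pyRange 0 (PySem.Int.floordiv N 8 + 1) 1).foldl (fun st t =>
      (PySem.List.pyRange 0 (PySem.Int.floordiv (N - 8*t) 7 + 1) 1).foldl (fun st z =>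
        (PySem.List.pyRange 0 (PySem.Int.floordiv (N - 8*t - 7*z) 6 + 1) 1).foldl (fun st y =>
          let remaining := N - (8*t + 7*z + 6*y)
          if remaining < 0 then st
          else if PySem.Int.mod remaining 5 ≠ 0 then st
          else
            let x := PySem.Int.floordiv remaining 5
            let count := x + y + z + t
            -- min_count starts at float('inf'): modelled as none (count < inf is always true)
            match st with
            | (none, _) => (some count, some [x, y, z, t])
            | (some m, b) => if count < m then (some count, some [x, y, z, t]) else (some m, b)
        ) st) st) ((none : Option Int), (none : Option (List Int)))).2

-- ===== PORT B =====
def find_min_sum_solution_alt (N : Int) : Option (List Int) :=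
  if N < 5 then none
  else if N = 9 then some [0, 0, 0, 1]
  else
    let k := -(PySem.Int.floordiv (-N) 8)
    let r := N - 5 * k
    let t := max 0 (r - 2 * k)
    let s := r - 3 * t
    let z := max 0 (s - (k - t))
    let y := s - 2 * z
    let x := k - y - z - t
    some [x, y, z, t]

-- ===== PRECONDITION & SPEC =====
-- Python A raises ValueError for N < 5; exactly those inputs are excluded.
def Pre_find_min_sum_solution (N : Int) : Prop := 5 ≤ N
instance (N : Int) : Decidable (Pre_find_min_sum_solution N) := by unfold Pre_find_min_sum_solution; infer_instance
def pvWitness_find_min_sum_solution : Int := 12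

def Spec_find_min_sum_solution (N : Int) (out : Option (List Int)) : Prop := out = find_min_sum_solution_alt N
instance (N : Int) (out : Option (List Int)) : Decidable (Spec_find_min_sum_solution N out) := by unfold Spec_find_min_sum_solution; infer_instance

-- ===== CLAIM (what is proved, stated in full; the proofs are below) =====
def Claim_equal_find_min_sum_solution : Prop := ∀ (N : Int), Dom_find_min_sum_solution N → Pre_find_min_sum_solution N → Spec_find_min_sum_solution N (find_min_sum_solution N)

-- ===== LEMMAS AND PROOFS =====

-- A's loop body, factored: the (count, tuple) produced at (t,z,y), none when the body 'continue's
def pvF (N t z y : Int) : Option (Int × List Int) :=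
  let remaining := N - (8*t + 7*z + 6*y)
  if remaining < 0 then none
  else if PySem.Int.mod remaining 5 ≠ 0 then none
  else
    let x := PySem.Int.floordiv remaining 5
    some (x + y + z + t, [x, y, z, t])

-- A's state update on a produced (count, tuple)
def pvStep (st : Option Int × Option (List Int)) (p : Int × List Int) : Option Int × Option (List Int) :=
  match st with
  | (none, _) => (some p.1, some p.2)
  | (some m, b) => if p.1 < m then (some p.1, some p.2) else (some m, b)

-- the scan order of A's three nested loops
def pvL (N : Int) : List (Int × Int × Int) :=
  (PySem.List.pyRange 0 (PySem.Int.floordiv N 8 + 1) 1).flatMap (fun t =>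
    (PySem.List.pyRange 0 (PySem.Int.floordiv (N - 8*t) 7 + 1) 1).flatMap (fun z =>
      (PySem.List.pyRange 0 (PySem.Int.floordiv (N - 8*t - 7*z) 6 + 1) 1).map (fun y => (t, z, y))))

def pvCL (N : Int) : List (Int × List Int) :=
  (pvL N).filterMap (fun p => pvF N p.1 p.2.1 p.2.2)

-- "first element attaining the minimal key", computed from the right
def pvPick (p : Int × List Int) : Option (Int × List Int) → Option (Int × List Int)
  | none => some p
  | some q => if q.1 < p.1 then some q else some p

def pvBest : List (Int × List Int) → Option (Int × List Int)
  | [] => none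
  | p :: rest => pvPick p (pvBest rest)

def pvKey (p : Int × List Int) : Int × Int × Int := (p.2.getD 3 0, p.2.getD 2 0, p.2.getD 1 0)

def pvLexLt (a b : Int × Int × Int) : Prop :=
  a.1 < b.1 ∨ (a.1 = b.1 ∧ (a.2.1 < b.2.1 ∨ (a.2.1 = b.2.1 ∧ a.2.2 < b.2.2)))

lemma pvPick_none (p : Int × List Int) : pvPick p none = some p := rfl
lemma pvPick_some (p q : Int × List Int) :
    pvPick p (some q) = if q.1 < p.1 then some q else some p := rfl
lemma pvBest_nil : pvBest [] = none := rfl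
lemma pvBest_cons (p : Int × List Int) (rest : List (Int × List Int)) :
    pvBest (p :: rest) = pvPick p (pvBest rest) := rfl

lemma pvBest_mem {l : List (Int × List Int)} {p : Int × List Int} (h : pvBest l = some p) : p ∈ l := by
  induction l generalizing p with
  | nil => simp [pvBest] at h
  | cons a rest ih =>
    rw [pvBest_cons] at h
    cases hr : pvBest rest with
    | none => rw [hr, pvPick_none] at h; injection h with h2; subst h2; exact List.mem_cons_self
    | some m =>
      rw [hr, pvPick_some] at h
      by_cases hq : m.1 < a.1
      · rw [if_pos hq] at h; injection h with h2; subst h2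
        exact List.mem_cons_of_mem _ (ih hr)
      · rw [if_neg hq] at h; injection h with h2; subst h2; exact List.mem_cons_self

lemma pvBest_spec {l : List (Int × List Int)} {v : Int × List Int}
    (hmem : v ∈ l)
    (hsorted : l.Pairwise (fun a b => pvLexLt (pvKey a) (pvKey b)))
    (hmin : ∀ p ∈ l, v.1 ≤ p.1)
    (hfirst : ∀ p ∈ l, p.1 = v.1 → p = v ∨ pvLexLt (pvKey v) (pvKey p)) :
    pvBest l = some v := by
  induction l with
  | nil => simp at hmem
  | cons a rest ih =>
    rcases List.pairwise_cons.mp hsorted with ⟨ha, hrest⟩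
    cases hmem with
    | head =>
      rw [pvBest_cons]
      cases hr : pvBest rest with
      | none => rw [pvPick_none]
      | some q =>
        have hq : v.1 ≤ q.1 := hmin q (List.mem_cons_of_mem _ (pvBest_mem hr))
        rw [pvPick_some, if_neg (by omega : ¬ q.1 < v.1)]
    | tail _ hm =>
      have hav : pvLexLt (pvKey a) (pvKey v) := ha v hm
      have hva : v.1 < a.1 := by
        have h1 : v.1 ≤ a.1 := hmin a List.mem_cons_self
        rcases lt_or_eq_of_le h1 with h | h
        · exact h
        · exfalso
          rcases hfirst a List.mem_cons_self h.symm with heq | hlex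
          · subst heq; unfold pvLexLt at hav; omega
          · unfold pvLexLt at hav hlex; omega
      have hres : pvBest rest = some v :=
        ih hm hrest (fun p hp => hmin p (List.mem_cons_of_mem _ hp))
          (fun p hp he => hfirst p (List.mem_cons_of_mem _ hp) he)
      rw [pvBest_cons, hres, pvPick_some, if_pos hva]

def pvComb (m : Int) (b : Option (List Int)) : Option (Int × List Int) → Option Int × Option (List Int)
  | none => (some m, b)
  | some q => if q.1 < m then (some q.1, some q.2) else (some m, b)

def pvComb0 : Option (Int × List Int) → Option Int × Option (List Int)
  | none => (none, none)
  | some q => (some q.1, some q.2)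

lemma pvComb_none (m : Int) (b : Option (List Int)) : pvComb m b none = (some m, b) := rfl
lemma pvComb_some (m : Int) (b : Option (List Int)) (q : Int × List Int) :
    pvComb m b (some q) = if q.1 < m then (some q.1, some q.2) else (some m, b) := rfl
lemma pvComb0_none : pvComb0 none = (none, none) := rfl
lemma pvComb0_some (q : Int × List Int) : pvComb0 (some q) = (some q.1, some q.2) := rfl

lemma foldl_pvStep_some (l : List (Int × List Int)) (m : Int) (b : Option (List Int)) :
    l.foldl pvStep (some m, b) = pvComb m b (pvBest l) := by
  induction l generalizing m b with
  | nil => simp [pvBest_nil, pvComb_none]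
  | cons p rest ih =>
    rw [List.foldl_cons, pvBest_cons]
    by_cases hp : p.1 < m
    · have hstep : pvStep (some m, b) p = (some p.1, some p.2) := by
        simp only [pvStep]; rw [if_pos hp]
      rw [hstep, ih p.1 (some p.2)]
      cases hr : pvBest rest with
      | none => rw [pvPick_none, pvComb_none, pvComb_some, if_pos hp]
      | some q =>
        by_cases hq : q.1 < p.1
        · rw [pvPick_some, if_pos hq, pvComb_some, pvComb_some, if_pos hq,
              if_pos (by omega : q.1 < m)]
        · rw [pvPick_some, if_neg hq, pvComb_some, pvComb_some, if_neg hq, if_pos hp]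
    · have hstep : pvStep (some m, b) p = (some m, b) := by
        simp only [pvStep]; rw [if_neg hp]
      rw [hstep, ih m b]
      cases hr : pvBest rest with
      | none => rw [pvPick_none, pvComb_none, pvComb_some, if_neg hp]
      | some q =>
        by_cases hq : q.1 < p.1
        · rw [pvPick_some, if_pos hq]
        · rw [pvPick_some, if_neg hq, pvComb_some, pvComb_some,
              if_neg (by omega : ¬ q.1 < m), if_neg hp]

lemma foldl_pvStep_none (l : List (Int × List Int)) :
    l.foldl pvStep ((none : Option Int), (none : Option (List Int))) = pvComb0 (pvBest l) := by
  cases l with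
  | nil => simp [pvBest_nil, pvComb0_none]
  | cons p rest =>
    have hstep : pvStep ((none : Option Int), (none : Option (List Int))) p = (some p.1, some p.2) := by
      simp [pvStep]
    rw [List.foldl_cons, pvBest_cons, hstep, foldl_pvStep_some rest p.1 (some p.2)]
    cases hr : pvBest rest with
    | none => rw [pvPick_none, pvComb_none, pvComb0_some]
    | some q =>
      by_cases hq : q.1 < p.1
      · rw [pvPick_some, if_pos hq, pvComb_some, if_pos hq, pvComb0_some]
      · rw [pvPick_some, if_neg hq, pvComb_some, if_neg hq, pvComb0_some]

-- A's nested folds equal the flat fold over pvCL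
lemma portA_as_fold (N : Int) (h5 : ¬ N < 5) (h9 : ¬ N = 9) :
    find_min_sum_solution N = ((pvCL N).foldl pvStep ((none : Option Int), (none : Option (List Int)))).2 := by
  unfold find_min_sum_solution pvCL pvL
  rw [if_neg h5, if_neg h9]
  rw [List.foldl_filterMap, List.foldl_flatMap]
  congr 2
  funext st t
  rw [List.foldl_flatMap]
  congr 1
  funext st z
  rw [List.foldl_map]
  congr 1
  funext st y
  simp only [pvF, pvStep]
  by_cases hneg : N - (8*t + 7*z + 6*y) < 0
  · rw [if_pos hneg, if_pos hneg]
  · rw [if_neg hneg, if_neg hneg]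
    by_cases hmod : PySem.Int.mod (N - (8*t + 7*z + 6*y)) 5 ≠ 0
    · rw [if_pos hmod, if_pos hmod]
    · rw [if_neg hmod, if_neg hmod]

-- membership in pvL characterized arithmetically
lemma mem_pvL (N t z y : Int) :
    (t, z, y) ∈ pvL N ↔ (0 ≤ t ∧ 8*t ≤ N ∧ 0 ≤ z ∧ 7*z ≤ N - 8*t ∧ 0 ≤ y ∧ 6*y ≤ N - 8*t - 7*z) := by
  unfold pvL
  simp only [List.mem_flatMap, List.mem_map]
  constructor
  · rintro ⟨t', ht', z', hz', y', hy', heq⟩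
    injection heq with h1 h2
    injection h2 with h2 h3
    rw [h1] at ht' hz' hy'
    rw [h2] at hz' hy'
    rw [h3] at hy'
    rw [PySem.List.mem_pyRange_one] at ht' hz' hy'
    have htb : t ≤ PySem.Int.floordiv N 8 := by omega
    have hzb : z ≤ PySem.Int.floordiv (N - 8*t) 7 := by omega
    have hyb : y ≤ PySem.Int.floordiv (N - 8*t - 7*z) 6 := by omega
    refine ⟨ht'.1, ?_, hz'.1, ?_, hy'.1, ?_⟩
    · have := (PySem.Int.le_floordiv_iff_mul_le (a := N) (b := 8) (q := t) (by omega)).mp htb; omega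
    · have := (PySem.Int.le_floordiv_iff_mul_le (a := N - 8*t) (b := 7) (q := z) (by omega)).mp hzb; omega
    · have := (PySem.Int.le_floordiv_iff_mul_le (a := N - 8*t - 7*z) (b := 6) (q := y) (by omega)).mp hyb; omega
  · rintro ⟨ht0, ht8, hz0, hz7, hy0, hy6⟩
    refine ⟨t, ?_, z, ?_, y, ?_, rfl⟩
    · rw [PySem.List.mem_pyRange_one]
      have := (PySem.Int.le_floordiv_iff_mul_le (a := N) (b := 8) (q := t) (by omega)).mpr (by omega)
      omega
    · rw [PySem.List.mem_pyRange_one]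
      have := (PySem.Int.le_floordiv_iff_mul_le (a := N - 8*t) (b := 7) (q := z) (by omega)).mpr (by omega)
      omega
    · rw [PySem.List.mem_pyRange_one]
      have := (PySem.Int.le_floordiv_iff_mul_le (a := N - 8*t - 7*z) (b := 6) (q := y) (by omega)).mpr (by omega)
      omega

-- what pvF produces when it produces
lemma pvF_eq_some {N t z y : Int} {p : Int × List Int} (h : pvF N t z y = some p) :
    ∃ x : Int, 0 ≤ x ∧ 5*x + 6*y + 7*z + 8*t = N ∧ p = (x + y + z + t, [x, y, z, t]) := by
  unfold pvF at h
  by_cases hneg : N - (8*t + 7*z + 6*y) < 0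
  · rw [if_pos hneg] at h; simp at h
  · rw [if_neg hneg] at h
    by_cases hmod : PySem.Int.mod (N - (8*t + 7*z + 6*y)) 5 ≠ 0
    · rw [if_pos hmod] at h; simp at h
    · rw [if_neg hmod] at h
      rw [not_not, PySem.Int.mod_eq_zero_iff_dvd] at hmod
      obtain ⟨x, hx⟩ := hmod
      have hfd : PySem.Int.floordiv (N - (8*t + 7*z + 6*y)) 5 = x := by
        rw [PySem.Int.floordiv_eq_iff_of_pos (by omega)]; omega
      simp only [hfd] at h
      injection h with h2
      exact ⟨x, by omega, by omega, h2.symm⟩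

lemma pvF_of_sol {N t z y x : Int} (hx : 0 ≤ x) (hsum : 5*x + 6*y + 7*z + 8*t = N)
    (_hy : 0 ≤ y) (_hz : 0 ≤ z) (_ht : 0 ≤ t) :
    pvF N t z y = some (x + y + z + t, [x, y, z, t]) := by
  unfold pvF
  have hne : ¬ (N - (8*t + 7*z + 6*y) < 0) := by omega
  have hmodne : ¬ (PySem.Int.mod (N - (8*t + 7*z + 6*y)) 5 ≠ 0) := by
    rw [not_not, PySem.Int.mod_eq_zero_iff_dvd]
    exact ⟨x, by omega⟩
  rw [if_neg hne, if_neg hmodne]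
  have hfd : PySem.Int.floordiv (N - (8*t + 7*z + 6*y)) 5 = x := by
    rw [PySem.Int.floordiv_eq_iff_of_pos (by omega)]; omega
  simp only [hfd]

-- pvCL is sorted in A's scan order (lex on (t,z,y))
lemma pvCL_sorted (N : Int) :
    (pvCL N).Pairwise (fun a b => pvLexLt (pvKey a) (pvKey b)) := by
  unfold pvCL
  rw [List.pairwise_filterMap]
  have key_eq : ∀ (t z y : Int) (p : Int × List Int), pvF N t z y = some p → pvKey p = (t, z, y) := by
    intro t z y p h
    obtain ⟨x, _, _, rfl⟩ := pvF_eq_some h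
    simp [pvKey]
  have : (pvL N).Pairwise (fun a b => pvLexLt a b) := by
    unfold pvL
    rw [List.pairwise_flatMap]
    constructor
    · intro t _
      rw [List.pairwise_flatMap]
      constructor
      · intro z _
        rw [List.pairwise_map]
        refine List.Pairwise.imp ?_ (PySem.List.pairwise_lt_pyRange_one 0 _)
        intro y1 y2 h; exact Or.inr ⟨rfl, Or.inr ⟨rfl, h⟩⟩
      · refine List.Pairwise.imp ?_ (PySem.List.pairwise_lt_pyRange_one 0 _)
        intro z1 z2 hz p hp q hq
        simp only [List.mem_map] at hp hq
        obtain ⟨y1, _, rfl⟩ := hp; obtain ⟨y2, _, rfl⟩ := hq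
        exact Or.inr ⟨rfl, Or.inl hz⟩
    · refine List.Pairwise.imp ?_ (PySem.List.pairwise_lt_pyRange_one 0 _)
      intro t1 t2 ht p hp q hq
      simp only [List.mem_flatMap, List.mem_map] at hp hq
      obtain ⟨z1, _, y1, _, rfl⟩ := hp; obtain ⟨z2, _, y2, _, rfl⟩ := hq
      exact Or.inl ht
  refine List.Pairwise.imp_of_mem ?_ this
  intro a b ha hb hab p hp q hq
  obtain ⟨ta, za, ya⟩ := a; obtain ⟨tb, zb, yb⟩ := b
  rw [key_eq _ _ _ _ hp, key_eq _ _ _ _ hq]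
  exact hab

-- every element of pvCL is a nonnegative solution; its key components recover (t,z,y)
lemma mem_pvCL_elim {N : Int} {p : Int × List Int} (hp : p ∈ pvCL N) :
    ∃ x y z t : Int, 0 ≤ x ∧ 0 ≤ y ∧ 0 ≤ z ∧ 0 ≤ t ∧ 5*x + 6*y + 7*z + 8*t = N ∧
      p = (x + y + z + t, [x, y, z, t]) := by
  unfold pvCL at hp
  rw [List.mem_filterMap] at hp
  obtain ⟨⟨t, z, y⟩, hmem, hf⟩ := hp
  rw [mem_pvL] at hmem
  obtain ⟨x, hx0, hsum, rfl⟩ := pvF_eq_some hf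
  exact ⟨x, y, z, t, hx0, by omega, by omega, by omega, hsum, rfl⟩

-- the ceiling k = -((-N) // 8) brackets N
lemma ceil8_bracket (N : Int) : 8 * (-(PySem.Int.floordiv (-N) 8)) - 8 < N ∧ N ≤ 8 * (-(PySem.Int.floordiv (-N) 8)) := by
  have := PySem.Int.neg_floordiv_neg_eq_iff_of_pos (a := N) (b := 8)
    (q := -(PySem.Int.floordiv (-N) 8)) (by omega)
  have h := (this.mp rfl)
  omega

-- the core equivalence for N ≥ 5, N ≠ 9
lemma main_eq (N : Int) (h5 : 5 ≤ N) (h9 : N ≠ 9) :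
    find_min_sum_solution N = find_min_sum_solution_alt N := by
  have h5' : ¬ N < 5 := by omega
  rw [portA_as_fold N h5' h9, foldl_pvStep_none]
  -- B's closed-form components
  set k := -(PySem.Int.floordiv (-N) 8) with hk
  have hbr := ceil8_bracket N
  rw [← hk] at hbr
  set r := N - 5 * k with hr
  set tB := max 0 (r - 2 * k) with htB
  set sB := r - 3 * tB with hsB
  set zB := max 0 (sB - (k - tB)) with hzB
  set yB := sB - 2 * zB with hyB
  set xB := k - yB - zB - tB with hxB
  have hfacts : 0 ≤ xB ∧ 0 ≤ yB ∧ 0 ≤ zB ∧ 0 ≤ tB ∧ 5*xB + 6*yB + 7*zB + 8*tB = N ∧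
      xB + yB + zB + tB = k := by omega
  obtain ⟨hx0, hy0, hz0, ht0, hsum, hcnt⟩ := hfacts
  have hvmem : (k, [xB, yB, zB, tB]) ∈ pvCL N := by
    unfold pvCL
    rw [List.mem_filterMap]
    refine ⟨(tB, zB, yB), ?_, ?_⟩
    · rw [mem_pvL]; omega
    · rw [pvF_of_sol hx0 hsum hy0 hz0 ht0]
      congr 1
      rw [Prod.ext_iff]
      exact ⟨by simpa using hcnt, rfl⟩
  have hbest : pvBest (pvCL N) = some (k, [xB, yB, zB, tB]) := by
    apply pvBest_spec hvmem (pvCL_sorted N)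
    · intro p hp
      obtain ⟨x, y, z, t, hx', hy', hz', ht', hsum', rfl⟩ := mem_pvCL_elim hp
      show k ≤ x + y + z + t
      omega
    · intro p hp he
      obtain ⟨x, y, z, t, hx', hy', hz', ht', hsum', rfl⟩ := mem_pvCL_elim hp
      have he' : x + y + z + t = k := he
      have hkey1 : pvKey (x + y + z + t, [x, y, z, t]) = (t, z, y) := rfl
      have hkey2 : pvKey (k, [xB, yB, zB, tB]) = (tB, zB, yB) := rfl
      rw [hkey1, hkey2]
      unfold pvLexLt
      by_cases het : t = tB
      · by_cases hez : z = zB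
        · left
          obtain ⟨hx, hy2, hz2, ht2⟩ : x = xB ∧ y = yB ∧ z = zB ∧ t = tB := by omega
          rw [hx, hy2, hz2, ht2, hcnt]
        · right
          show tB < t ∨ (tB = t ∧ (zB < z ∨ (zB = z ∧ yB < y)))
          right
          exact ⟨het.symm, Or.inl (by omega)⟩
      · right
        show tB < t ∨ (tB = t ∧ (zB < z ∨ (zB = z ∧ yB < y)))
        left
        omega
  rw [hbest, pvComb0_some]
  unfold find_min_sum_solution_alt
  rw [if_neg h5', if_neg h9]

-- ===== VERDICT (by name: the statement is the Claim_ definition above) =====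
theorem find_min_sum_solution_spec : Claim_equal_find_min_sum_solution := by
  intro N _ hpre
  unfold Spec_find_min_sum_solution
  by_cases h9 : N = 9
  · subst h9; rfl
  · exact main_eq N hpre h9
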